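-- pv_equiv track=rewrite | github.com/moltlab/agentic-workflow-builder | utils/selectors.py | rank_files_by_query
-- ===== SOURCE A (Python) =====
-- def tokenize(text: str) -> set[str]:
--     return {t for t in ''.join(c if c.isalnum() else ' ' for c in text.lower()).split() if t}
--
-- def rank_files_by_query(filenames: list[str], query: str) -> list[str]:
--     """Simple relevance ranking by token overlap with special-casing common intents."""
--     q_tokens = tokenize(query.lower())
--     if not filenames:
--         return []
--
--     # Calculate scores for each filename based on token overlap
--     scored_files: list[tuple[int, str]] = []
--     for name in filenames:
--         name_tokens = tokenize(name)
--         score = len(name_tokens & q_tokens)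
--         if score > 0:
--             scored_files.append((score, name))
--
--     sorted_files = sorted(scored_files, key=lambda item: (-item[0], item[1]))
--
--     # Extract just the filenames and return the top 3 relevant files
--     ranked_filenames = [name for score, name in sorted_files[:3]]
--     return ranked_filenames
-- ===== SOURCE B (Python) =====
-- def tokenize(text: str) -> set[str]:
--     return {t for t in ''.join(c if c.isalnum() else ' ' for c in text.lower()).split() if t}
--
-- def rank_files_by_query(filenames: list[str], query: str) -> list[str]:
--     """One-pass bounded insertion: keep only the current top-3 (score, name) entries,
--     ordered by (-score, name), instead of building and fully sorting a score list."""
--     q_tokens = tokenize(query.lower())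
--     if not filenames:
--         return []
--     best: list[tuple[int, str]] = []  # at most 3 entries; earlier files win ties
--     for name in filenames:
--         score = len(tokenize(name) & q_tokens)
--         if score > 0:
--             i = 0
--             while i < len(best) and not ((-score, name) < (-best[i][0], best[i][1])):
--                 i += 1
--             best.insert(i, (score, name))
--             best = best[:3]
--     return [name for _, name in best]
-- ===== Notes on version B (the rewrite author's own statement) =====
-- stated objective: alternative
-- what changed: Instead of collecting all positive-score (score, name) pairs, fully sorting them by (-score, name) and slicing the first three, B makes a single pass that maintains only the current top-3 entries with a bounded stable insertion, so no score list and no full sort exist.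
import Mathlib
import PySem

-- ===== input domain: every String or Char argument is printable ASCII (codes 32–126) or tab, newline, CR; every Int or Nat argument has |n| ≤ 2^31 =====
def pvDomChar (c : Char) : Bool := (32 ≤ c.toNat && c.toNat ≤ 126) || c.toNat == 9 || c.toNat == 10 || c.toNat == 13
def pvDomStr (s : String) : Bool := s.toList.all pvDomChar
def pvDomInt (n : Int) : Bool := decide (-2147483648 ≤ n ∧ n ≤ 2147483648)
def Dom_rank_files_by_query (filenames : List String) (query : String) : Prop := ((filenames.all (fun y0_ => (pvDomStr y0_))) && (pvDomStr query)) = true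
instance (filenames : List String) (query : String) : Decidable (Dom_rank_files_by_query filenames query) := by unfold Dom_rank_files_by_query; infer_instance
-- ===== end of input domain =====

-- B replaces the build-everything-then-sort-then-slice of A by a single pass that keeps only
-- the current top-3 (score, name) entries via bounded insertion (objective: alternative).

-- ===== PORT A =====
-- shared helper: Python's tokenize(text) (B's Python keeps it unchanged)
def tokenizeL (text : List Char) : PySem.Set (List Char) :=
  PySem.Set.ofList
    ((PySem.Chars.split₀
        ((PySem.Chars.lower text).map (fun c => if PySem.Chars.isalnum c then c else ' '))).filter
      (fun t => decide (t ≠ [])))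

def rank_files_by_query (filenames : List String) (query : String) : List String :=
  let q_tokens := tokenizeL (PySem.Chars.lower query.toList)
  if filenames = [] then []
  else
    let scored_files := filenames.foldl (fun acc name =>
      let name_tokens := tokenizeL name.toList
      let score := PySem.Set.len (PySem.Set.inter name_tokens q_tokens)
      if score > 0 then acc ++ [(score, name)] else acc) []
    let sorted_files := PySem.List.sorted2 scored_files (fun it => -it.1) (fun it => it.2)
    (PySem.List.slice sorted_files none (some 3)).map (fun p => p.2)

-- ===== PORT B =====
-- the inner while/insert of Source B: walk past entries whose tuple key (-score, name) is ≤ the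
-- new one, insert before the first strictly greater (Python tuple '<' written out component-wise)
def bInsert (x : Int × String) : List (Int × String) → List (Int × String)
  | [] => [x]
  | y :: ys =>
      if decide (-x.1 < -y.1) || (decide ((-x.1 : Int) = -y.1) && decide (x.2 < y.2)) then
        x :: y :: ys
      else y :: bInsert x ys

def rank_files_by_query_alt (filenames : List String) (query : String) : List String :=
  let q_tokens := tokenizeL (PySem.Chars.lower query.toList)
  if filenames = [] then []
  else
    let best := filenames.foldl (fun best name =>
      let score := PySem.Set.len (PySem.Set.inter (tokenizeL name.toList) q_tokens)
      if score > 0 then PySem.List.slice (bInsert (score, name) best) none (some 3) else best) []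
    best.map (fun p => p.2)

-- ===== PRECONDITION & SPEC =====
def Spec_rank_files_by_query (filenames : List String) (query : String) (out : List String) : Prop := out = rank_files_by_query_alt filenames query
instance (filenames : List String) (query : String) (out : List String) : Decidable (Spec_rank_files_by_query filenames query out) := by unfold Spec_rank_files_by_query; infer_instance

-- ===== CLAIM (what is proved, stated in full; the proofs are below) =====
def Claim_equal_rank_files_by_query : Prop := ∀ (filenames : List String) (query : String), Dom_rank_files_by_query filenames query → Spec_rank_files_by_query filenames query (rank_files_by_query filenames query)

-- ===== LEMMAS AND PROOFS =====

-- the comparison sorted2 uses for key (fun it => (-it.1, it.2))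
def pvLt (a b : Int × String) : Bool :=
  decide (-a.1 < -b.1) || (!decide (-b.1 < -a.1) && decide (a.2 < b.2))

theorem pvLt_cond (x y : Int × String) :
    (decide (-x.1 < -y.1) || (decide ((-x.1 : Int) = -y.1) && decide (x.2 < y.2))) = pvLt x y := by
  unfold pvLt
  rcases lt_trichotomy (-x.1 : Int) (-y.1) with h | h | h
  · simp [h]
  · simp [h, lt_irrefl]
  · simp [asymm h, ne_of_gt h, h]

theorem bInsert_eq_insertBy (x : Int × String) (s : List (Int × String)) :
    bInsert x s = PySem.List.insertBy pvLt x s := by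
  induction s with
  | nil => rfl
  | cons y ys ih =>
      simp only [bInsert, PySem.List.insertBy, pvLt_cond, ih]

theorem take_insertBy (L : Int × String → Int × String → Bool) (x : Int × String) :
    ∀ (s : List (Int × String)) (k : Nat),
      (PySem.List.insertBy L x s).take k = (PySem.List.insertBy L x (s.take k)).take k := by
  intro s
  induction s with
  | nil => intro k; simp
  | cons y ys ih =>
      intro k
      cases k with
      | zero => simp
      | succ j =>
          simp only [List.take_succ_cons, PySem.List.insertBy]
          by_cases h : L x y = true
          · simp only [if_pos h, List.take_succ_cons]
            have : (y :: ys.take j).take j = (y :: ys).take j := by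
              cases j with
              | zero => simp
              | succ i => simp [List.take_take]
            rw [this]
          · simp only [if_neg h, List.take_succ_cons, ih j]

theorem foldl_take_insertBy (L : Int × String → Int × String → Bool) (k : Nat) :
    ∀ (m : List (Int × String)) (s : List (Int × String)),
      (m.foldl (fun acc x => PySem.List.insertBy L x acc) s).take k
        = m.foldl (fun b y => (PySem.List.insertBy L y b).take k) (s.take k) := by
  intro m
  induction m with
  | nil => intro s; rfl
  | cons x xs ih =>
      intro s
      rw [List.foldl_cons, List.foldl_cons, ih, take_insertBy]

-- ===== VERDICT (by name: the statement is the Claim_ definition above) =====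
theorem rank_files_by_query_spec : Claim_equal_rank_files_by_query := by
  intro filenames query _
  unfold Spec_rank_files_by_query rank_files_by_query rank_files_by_query_alt
  by_cases hf : filenames = []
  · simp [hf]
  · simp only [hf, if_false]
    set q := tokenizeL (PySem.Chars.lower query.toList) with hq
    have hslice : ∀ (l : List (Int × String)),
        PySem.List.slice l none (some 3) = l.take 3 :=
      fun l => PySem.List.slice_to l (by norm_num)
    have hb :
        filenames.foldl (fun best name =>
            if PySem.Set.len (PySem.Set.inter (tokenizeL name.toList) q) > 0 then
              PySem.List.slice (bInsert (PySem.Set.len (PySem.Set.inter (tokenizeL name.toList) q), name) best) none (some 3)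
            else best) []
          = (filenames.filter
              (fun name => decide (PySem.Set.len (PySem.Set.inter (tokenizeL name.toList) q) > 0))).foldl
              (fun b name =>
                (PySem.List.insertBy pvLt
                  (PySem.Set.len (PySem.Set.inter (tokenizeL name.toList) q), name) b).take 3) [] := by
      rw [PySem.List.foldl_ite_eq_foldl_filter
            (p := fun (name : String) => PySem.Set.len (PySem.Set.inter (tokenizeL name.toList) q) > 0)
            (f := fun (b : List (Int × String)) (name : String) => PySem.List.slice
              (bInsert (PySem.Set.len (PySem.Set.inter (tokenizeL name.toList) q), name) b) none (some 3))]
      exact PySem.List.foldl_congr_mem _ _ _ _ (fun b name _ => by rw [hslice, bInsert_eq_insertBy])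
    have ha :
        filenames.foldl (fun acc name =>
            if PySem.Set.len (PySem.Set.inter (tokenizeL name.toList) q) > 0 then
              acc ++ [(PySem.Set.len (PySem.Set.inter (tokenizeL name.toList) q), name)]
            else acc) []
          = (filenames.filter
              (fun name => decide (PySem.Set.len (PySem.Set.inter (tokenizeL name.toList) q) > 0))).map
              (fun name => (PySem.Set.len (PySem.Set.inter (tokenizeL name.toList) q), name)) := by
      rw [PySem.List.foldl_append_ite
            (p := fun (name : String) => PySem.Set.len (PySem.Set.inter (tokenizeL name.toList) q) > 0)
            (f := fun (name : String) => (PySem.Set.len (PySem.Set.inter (tokenizeL name.toList) q), name))]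
      exact List.nil_append _
    have hsorted : ∀ (l : List (Int × String)),
        PySem.List.sorted2 l (fun it => -it.1) (fun it => it.2)
          = l.foldl (fun acc x => PySem.List.insertBy pvLt x acc) [] := by
      intro l
      simp only [PySem.List.sorted2, pvLt]
      rfl
    rw [ha, hsorted, hslice, foldl_take_insertBy, List.foldl_map, hb]
    simp
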